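-- pv_equiv track=rewrite | github.com/ZJU-BMI/AKI_Phenogroup | src/kaplan_meier_curve.py | data_fusion
-- ===== SOURCE A (Python) =====
-- def data_fusion(event_dict, group_id_dict):
--     aki_dict = {}
--     aki_time_dict = {}
--     death_dict = {}
--     death_time_dict = {}
--     for patient_id in group_id_dict:
--         for visit_id in group_id_dict[patient_id]:
--             group_id = group_id_dict[patient_id][visit_id]
--             if not aki_dict.__contains__(group_id):
--                 aki_dict[group_id] = []
--                 aki_time_dict[group_id] = []
--                 death_dict[group_id] = []
--                 death_time_dict[group_id] = []
--             aki_event = event_dict[patient_id][visit_id]['aki_event'] == 1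
--             aki_time = event_dict[patient_id][visit_id]['aki_time']
--             death_event = event_dict[patient_id][visit_id]['death_event']
--             death_time = event_dict[patient_id][visit_id]['death_time']
--             aki_dict[group_id].append(aki_event)
--             aki_time_dict[group_id].append(aki_time)
--             death_dict[group_id].append(death_event)
--             death_time_dict[group_id].append(death_time)
--     return aki_dict, aki_time_dict, death_dict, death_time_dict
-- ===== SOURCE B (Python) =====
-- def data_fusion(event_dict, group_id_dict):
--     # Stage 1: flatten everything into one stream of (group_id, aki_event==1,
--     # aki_time, death_event, death_time) records in visit order.
--     rows = []
--     for patient_id, visits in group_id_dict.items():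
--         for visit_id, group_id in visits.items():
--             e = event_dict[patient_id][visit_id]
--             rows.append((group_id, e['aki_event'] == 1, e['aki_time'],
--                          e['death_event'], e['death_time']))
--     # Stage 2: the group keys in first-seen order.
--     order = []
--     for r in rows:
--         if r[0] not in order:
--             order.append(r[0])
--     # Stage 3: gather by filtering the stream once per group and per field.
--     aki_dict = {g: [r[1] for r in rows if r[0] == g] for g in order}
--     aki_time_dict = {g: [r[2] for r in rows if r[0] == g] for g in order}
--     death_dict = {g: [r[3] for r in rows if r[0] == g] for g in order}
--     death_time_dict = {g: [r[4] for r in rows if r[0] == g] for g in order}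
--     return aki_dict, aki_time_dict, death_dict, death_time_dict
-- ===== Notes on version B (the rewrite author's own statement) =====
-- stated objective: alternative
-- what changed: Instead of maintaining four per-group dicts in lockstep with four appends per visit, B flattens the input into one stream of (group_id, fields) records, computes the first-seen group order, and builds each output list by filtering the record stream once per group (gather-by-filter), trading the single-pass accumulation for staged passes.
import Mathlib
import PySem

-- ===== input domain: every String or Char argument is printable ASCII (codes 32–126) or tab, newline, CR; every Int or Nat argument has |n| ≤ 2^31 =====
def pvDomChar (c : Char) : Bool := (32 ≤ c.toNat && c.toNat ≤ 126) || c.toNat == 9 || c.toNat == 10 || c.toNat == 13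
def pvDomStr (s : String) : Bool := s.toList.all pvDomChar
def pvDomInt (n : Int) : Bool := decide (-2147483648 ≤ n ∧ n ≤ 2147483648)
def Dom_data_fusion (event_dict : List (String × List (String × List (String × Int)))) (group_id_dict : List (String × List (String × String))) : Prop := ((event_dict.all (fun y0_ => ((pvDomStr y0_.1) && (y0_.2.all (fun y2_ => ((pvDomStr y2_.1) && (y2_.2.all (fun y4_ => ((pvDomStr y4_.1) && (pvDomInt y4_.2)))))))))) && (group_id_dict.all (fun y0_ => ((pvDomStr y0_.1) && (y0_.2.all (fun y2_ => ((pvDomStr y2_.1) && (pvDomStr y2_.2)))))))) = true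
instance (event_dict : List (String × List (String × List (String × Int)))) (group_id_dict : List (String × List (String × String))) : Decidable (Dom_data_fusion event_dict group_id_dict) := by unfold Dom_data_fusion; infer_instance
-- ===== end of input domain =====

-- B replaces A's single pass maintaining four per-group dicts in lockstep by a staged
-- gather-by-filter algorithm: flatten to one record stream, list the groups in first-seen
-- order, then build each list by filtering the stream per group (objective: alternative).

-- Shared input conversion: the nested association-list arguments denote the nested Python
-- dicts both programs receive (Dict.ofList = Python dict construction, last value wins).
def pvEvents (event_dict : List (String × List (String × List (String × Int)))) :
    PySem.Dict String (PySem.Dict String (PySem.Dict String Int)) :=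
  PySem.Dict.ofList (event_dict.map (fun p =>
    (p.1, PySem.Dict.ofList (p.2.map (fun q => (q.1, PySem.Dict.ofList q.2))))))

def pvGroups (group_id_dict : List (String × List (String × String))) :
    PySem.Dict String (PySem.Dict String String) :=
  PySem.Dict.ofList (group_id_dict.map (fun p => (p.1, PySem.Dict.ofList p.2)))

-- ===== PORT A =====
-- event_dict[patient_id][visit_id]['aki_event'] == 1, …: each bracket lookup raises
-- KeyError when missing (none here); on success the four event fields of the visit.
def pvRowA (ed : PySem.Dict String (PySem.Dict String (PySem.Dict String Int)))
    (pid vid : String) : Option (Bool × Int × Int × Int) :=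
  match (ed.get? pid).bind (fun m => m.get? vid) with
  | none => none
  | some e =>
    match e.get? "aki_event", e.get? "aki_time", e.get? "death_event", e.get? "death_time" with
    | some ae, some at_, some de, some dt => some (ae == 1, at_, de, dt)
    | _, _, _, _ => none

def pvSt4 : Type :=
  PySem.Dict String (List Bool) × PySem.Dict String (List Int) ×
  PySem.Dict String (List Int) × PySem.Dict String (List Int)

-- body of A's inner loop: the __contains__ guard inserting four empty lists, then the
-- four appends (d[g].append(x) on a present key = modify g [] (· ++ [x])); none = KeyError
def pvAppend4 (st : pvSt4) (gid : String) (r : Bool × Int × Int × Int) : pvSt4 :=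
  (st.1.modify gid [] (· ++ [r.1]), st.2.1.modify gid [] (· ++ [r.2.1]),
   st.2.2.1.modify gid [] (· ++ [r.2.2.1]), st.2.2.2.modify gid [] (· ++ [r.2.2.2]))

def pvStepA (ed : PySem.Dict String (PySem.Dict String (PySem.Dict String Int)))
    (pid : String) (st : Option pvSt4) (pv : String × String) : Option pvSt4 :=
  st.bind fun st =>
    (pvRowA ed pid pv.1).map fun r =>
      pvAppend4
        (if st.1.contains pv.2 then st else
          (st.1.insert pv.2 [], st.2.1.insert pv.2 [], st.2.2.1.insert pv.2 [], st.2.2.2.insert pv.2 []))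
        pv.2 r

def data_fusion (event_dict : List (String × List (String × List (String × Int)))) (group_id_dict : List (String × List (String × String))) : (List (String × List Bool)) × (List (String × List Int)) × (List (String × List Int)) × (List (String × List Int)) :=
  match (pvGroups group_id_dict).items.foldl
      (fun st p => p.2.items.foldl (pvStepA (pvEvents event_dict) p.1) st)
      (some (PySem.Dict.empty, PySem.Dict.empty, PySem.Dict.empty, PySem.Dict.empty)) with
  | some st => (st.1.items, st.2.1.items, st.2.2.1.items, st.2.2.2.items)
  | none => ([], [], [], [])   -- unreachable under Pre_ (Python A raises KeyError there)

-- ===== PORT B =====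
-- e = event_dict[patient_id][visit_id]; the appended record is
-- (group_id, e['aki_event'] == 1, e['aki_time'], e['death_event'], e['death_time'])
def pvRowB (ed : PySem.Dict String (PySem.Dict String (PySem.Dict String Int)))
    (pid vid : String) : Option (Bool × Int × Int × Int) :=
  match (ed.get? pid).bind (fun m => m.get? vid) with
  | none => none
  | some e =>
    match e.get? "aki_event", e.get? "aki_time", e.get? "death_event", e.get? "death_time" with
    | some ae, some at_, some de, some dt => some (ae == 1, at_, de, dt)
    | _, _, _, _ => none

-- rows.append((gid, …)); none = KeyError while flattening
def pvStepB (ed : PySem.Dict String (PySem.Dict String (PySem.Dict String Int)))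
    (pid : String) (ors : Option (List (String × Bool × Int × Int × Int)))
    (pv : String × String) : Option (List (String × Bool × Int × Int × Int)) :=
  ors.bind fun rs => (pvRowB ed pid pv.1).map fun r => rs ++ [(pv.2, r)]

def data_fusion_alt (event_dict : List (String × List (String × List (String × Int)))) (group_id_dict : List (String × List (String × String))) : (List (String × List Bool)) × (List (String × List Int)) × (List (String × List Int)) × (List (String × List Int)) :=
  match (pvGroups group_id_dict).items.foldl
      (fun ors p => p.2.items.foldl (pvStepB (pvEvents event_dict) p.1) ors)
      (some []) with
  | some rows =>
    -- 'if r[0] not in order: order.append(r[0])' is exactly Set.add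
    let order := rows.foldl (fun acc r => PySem.Set.add acc r.1) []
    -- the four dict comprehensions over the deduplicated 'order' (keys distinct, so each
    -- comprehension is exactly this association list)
    (order.map (fun g => (g, (rows.filter (fun r => r.1 == g)).map (·.2.1))),
     order.map (fun g => (g, (rows.filter (fun r => r.1 == g)).map (·.2.2.1))),
     order.map (fun g => (g, (rows.filter (fun r => r.1 == g)).map (·.2.2.2.1))),
     order.map (fun g => (g, (rows.filter (fun r => r.1 == g)).map (·.2.2.2.2))))
  | none => ([], [], [], [])

-- ===== PRECONDITION & SPEC =====
def pvRowOk (ed : PySem.Dict String (PySem.Dict String (PySem.Dict String Int)))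
    (pid vid : String) : Bool :=
  match (ed.get? pid).bind (fun m => m.get? vid) with
  | none => false
  | some e => e.contains "aki_event" && e.contains "aki_time" &&
              e.contains "death_event" && e.contains "death_time"

-- Pre_ excludes exactly the inputs on which Python A raises KeyError: some visit listed in
-- group_id_dict has no matching patient/visit/event-field entry in event_dict.
def Pre_data_fusion (event_dict : List (String × List (String × List (String × Int)))) (group_id_dict : List (String × List (String × String))) : Prop :=
  ((pvGroups group_id_dict).items.all (fun p =>
    p.2.items.all (fun v => pvRowOk (pvEvents event_dict) p.1 v.1))) = true

instance (event_dict : List (String × List (String × List (String × Int)))) (group_id_dict : List (String × List (String × String))) : Decidable (Pre_data_fusion event_dict group_id_dict) := by unfold Pre_data_fusion; infer_instance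

def pvWitness_data_fusion : (List (String × List (String × List (String × Int)))) × (List (String × List (String × String))) :=
  ([("p", [("v", [("aki_event", 1), ("aki_time", 2), ("death_event", 0), ("death_time", 3)])])],
   [("p", [("v", "g")])])

def Spec_data_fusion (event_dict : List (String × List (String × List (String × Int)))) (group_id_dict : List (String × List (String × String))) (out : (List (String × List Bool)) × (List (String × List Int)) × (List (String × List Int)) × (List (String × List Int))) : Prop := out = data_fusion_alt event_dict group_id_dict
instance (event_dict : List (String × List (String × List (String × Int)))) (group_id_dict : List (String × List (String × String))) (out : (List (String × List Bool)) × (List (String × List Int)) × (List (String × List Int)) × (List (String × List Int))) : Decidable (Spec_data_fusion event_dict group_id_dict out) := by unfold Spec_data_fusion; infer_instance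

-- ===== CLAIM (what is proved, stated in full; the proofs are below) =====
def Claim_equal_data_fusion : Prop := ∀ (event_dict : List (String × List (String × List (String × Int)))) (group_id_dict : List (String × List (String × String))), Dom_data_fusion event_dict group_id_dict → Pre_data_fusion event_dict group_id_dict → Spec_data_fusion event_dict group_id_dict (data_fusion event_dict group_id_dict)

-- ===== LEMMAS AND PROOFS =====

-- the grouped dict A's state denotes, built from B's flat record stream
def pvGdict (rows : List (String × Bool × Int × Int × Int)) :
    PySem.Dict String (List (Bool × Int × Int × Int)) :=
  rows.foldl (fun d x => d.modify x.1 [] (· ++ [x.2])) PySem.Dict.empty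

-- projecting one field out of the grouped dict of rows
def pvProj {α : Type} (f : Bool × Int × Int × Int → α)
    (g : PySem.Dict String (List (Bool × Int × Int × Int))) : PySem.Dict String (List α) :=
  PySem.Dict.mk (g.items.map (fun p => (p.1, p.2.map f)))

def pvP (g : PySem.Dict String (List (Bool × Int × Int × Int))) : pvSt4 :=
  (pvProj (·.1) g, pvProj (·.2.1) g, pvProj (·.2.2.1) g, pvProj (·.2.2.2) g)

theorem pvProj_contains {α : Type} (f : Bool × Int × Int × Int → α)
    (g : PySem.Dict String (List (Bool × Int × Int × Int))) (k : String) :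
    (pvProj f g).contains k = g.contains k := by
  show (g.items.map _).any _ = g.items.any _
  rw [List.any_map]; rfl

theorem pvProj_get? {α : Type} (f : Bool × Int × Int × Int → α)
    (l : List (String × List (Bool × Int × Int × Int))) (k : String) :
    (PySem.Dict.mk (l.map (fun p => (p.1, p.2.map f)))).get? k
      = ((PySem.Dict.mk l).get? k).map (List.map f) := by
  induction l with
  | nil => rfl
  | cons h t ih =>
    rw [List.map_cons, PySem.Dict.get?_mk_cons, PySem.Dict.get?_mk_cons]
    by_cases hk : h.1 == k
    · simp [hk]
    · simp [hk, ih]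

theorem pvProj_getD {α : Type} (f : Bool × Int × Int × Int → α)
    (g : PySem.Dict String (List (Bool × Int × Int × Int))) (k : String) :
    (pvProj f g).getD k [] = (g.getD k []).map f := by
  have h := pvProj_get? f g.items k
  rw [PySem.Dict.getD_eq_get?_getD, PySem.Dict.getD_eq_get?_getD]
  cases hg : (PySem.Dict.mk g.items).get? k with
  | none => simp [pvProj, h, hg]
  | some v => simp [pvProj, h, hg]

theorem pvProj_insert {α : Type} (f : Bool × Int × Int × Int → α)
    (g : PySem.Dict String (List (Bool × Int × Int × Int))) (k : String)
    (v : List (Bool × Int × Int × Int)) :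
    pvProj f (g.insert k v) = (pvProj f g).insert k (v.map f) := by
  apply PySem.Dict.ext
  by_cases hc : g.contains k
  · rw [show (pvProj f (g.insert k v)).items
        = (g.insert k v).items.map (fun p => (p.1, p.2.map f)) from rfl,
      PySem.Dict.items_insert_of_contains _ _ hc,
      PySem.Dict.items_insert_of_contains _ _ (by rw [pvProj_contains]; exact hc)]
    show (g.items.map _).map _ = (g.items.map _).map _
    rw [List.map_map, List.map_map]
    apply List.map_congr_left
    intro p _
    by_cases hp : p.1 == k <;> simp [Function.comp, hp]
  · rw [show (pvProj f (g.insert k v)).items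
        = (g.insert k v).items.map (fun p => (p.1, p.2.map f)) from rfl,
      PySem.Dict.items_insert_of_not_contains _ _ (by simpa using hc),
      PySem.Dict.items_insert_of_not_contains _ _
        (by rw [pvProj_contains]; simpa using hc)]
    simp [pvProj]

theorem pvProj_modify {α : Type} (f : Bool × Int × Int × Int → α)
    (g : PySem.Dict String (List (Bool × Int × Int × Int))) (k : String)
    (r : Bool × Int × Int × Int) :
    pvProj f (g.modify k [] (· ++ [r])) = (pvProj f g).modify k [] (· ++ [f r]) := by
  show pvProj f (g.insert k (g.getD k [] ++ [r]))
      = (pvProj f g).insert k ((pvProj f g).getD k [] ++ [f r])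
  rw [pvProj_insert, pvProj_getD, List.map_append]
  rfl

theorem pvAppend4_pvP (g : PySem.Dict String (List (Bool × Int × Int × Int)))
    (gid : String) (r : Bool × Int × Int × Int) :
    pvAppend4 (pvP g) gid r = pvP (g.modify gid [] (· ++ [r])) := by
  unfold pvAppend4 pvP
  refine Prod.ext ?_ (Prod.ext ?_ (Prod.ext ?_ ?_)) <;>
    exact (pvProj_modify _ g gid r).symm

theorem pvModify_insert_nil {α : Type} (d : PySem.Dict String (List α)) (k : String) (x : α) :
    (d.insert k []).modify k [] (· ++ [x]) = d.insert k [x] := by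
  show (d.insert k []).insert k ((d.insert k []).getD k [] ++ [x]) = d.insert k [x]
  rw [PySem.Dict.getD_insert_self, PySem.Dict.insert_insert_self]
  rfl

theorem pvProj_modify_fresh {α : Type} (f : Bool × Int × Int × Int → α)
    (g : PySem.Dict String (List (Bool × Int × Int × Int))) (k : String)
    (r : Bool × Int × Int × Int) (hcf : g.contains k = false) :
    ((pvProj f g).insert k []).modify k [] (· ++ [f r])
      = pvProj f (g.modify k [] (· ++ [r])) := by
  rw [pvModify_insert_nil, pvProj_modify]
  show (pvProj f g).insert k [f r]
      = (pvProj f g).insert k ((pvProj f g).getD k [] ++ [f r])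
  rw [PySem.Dict.getD_of_not_contains _ _ (by rw [pvProj_contains]; exact hcf)]
  rfl

theorem pvAppend4_fresh (g : PySem.Dict String (List (Bool × Int × Int × Int)))
    (gid : String) (r : Bool × Int × Int × Int) (hcf : g.contains gid = false) :
    pvAppend4 ((pvP g).1.insert gid [], (pvP g).2.1.insert gid [],
        (pvP g).2.2.1.insert gid [], (pvP g).2.2.2.insert gid []) gid r
      = pvP (g.modify gid [] (· ++ [r])) := by
  unfold pvAppend4 pvP
  refine Prod.ext ?_ (Prod.ext ?_ (Prod.ext ?_ ?_)) <;>
    exact pvProj_modify_fresh _ g gid r hcf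

theorem pvGdict_append (rs : List (String × Bool × Int × Int × Int))
    (x : String × Bool × Int × Int × Int) :
    pvGdict (rs ++ [x]) = (pvGdict rs).modify x.1 [] (· ++ [x.2]) := by
  unfold pvGdict
  rw [List.foldl_append]
  rfl

-- A's inner-loop step, read through pvP ∘ pvGdict, is B's record-appending step
theorem pvStepA_eq (ed : PySem.Dict String (PySem.Dict String (PySem.Dict String Int)))
    (pid : String) (ors : Option (List (String × Bool × Int × Int × Int)))
    (pv : String × String) :
    pvStepA ed pid (ors.map (fun rs => pvP (pvGdict rs))) pv
      = (pvStepB ed pid ors pv).map (fun rs => pvP (pvGdict rs)) := by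
  cases ors with
  | none => rfl
  | some rs =>
    show pvStepA ed pid (some (pvP (pvGdict rs))) pv = _
    have hrow : pvRowB ed pid pv.1 = pvRowA ed pid pv.1 := rfl
    unfold pvStepA pvStepB
    rw [hrow]
    cases hr : pvRowA ed pid pv.1 with
    | none => rfl
    | some r =>
      show some _ = some (pvP (pvGdict (rs ++ [(pv.2, r)])))
      congr 1
      rw [pvGdict_append]
      by_cases hc : (pvGdict rs).contains pv.2
      · have hc1 : (pvP (pvGdict rs)).1.contains pv.2 = true := by
          show (pvProj (·.1) (pvGdict rs)).contains pv.2 = true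
          rw [pvProj_contains]; exact hc
        rw [if_pos hc1]
        exact pvAppend4_pvP (pvGdict rs) pv.2 r
      · have hcf : (pvGdict rs).contains pv.2 = false := by simpa using hc
        have hc1 : (pvP (pvGdict rs)).1.contains pv.2 = false := by
          show (pvProj (·.1) (pvGdict rs)).contains pv.2 = false
          rw [pvProj_contains]; exact hcf
        rw [if_neg (by simp [hc1])]
        exact pvAppend4_fresh (pvGdict rs) pv.2 r hcf

theorem pvFoldInner_eq (ed : PySem.Dict String (PySem.Dict String (PySem.Dict String Int)))
    (pid : String) (vs : List (String × String))
    (ors : Option (List (String × Bool × Int × Int × Int))) :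
    vs.foldl (pvStepA ed pid) (ors.map (fun rs => pvP (pvGdict rs)))
      = (vs.foldl (pvStepB ed pid) ors).map (fun rs => pvP (pvGdict rs)) := by
  induction vs generalizing ors with
  | nil => rfl
  | cons v t ih => rw [List.foldl_cons, List.foldl_cons, pvStepA_eq]; exact ih _

theorem pvFoldOuter_eq (ed : PySem.Dict String (PySem.Dict String (PySem.Dict String Int)))
    (ps : List (String × PySem.Dict String String))
    (ors : Option (List (String × Bool × Int × Int × Int))) :
    ps.foldl (fun st p => p.2.items.foldl (pvStepA ed p.1) st)
        (ors.map (fun rs => pvP (pvGdict rs)))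
      = (ps.foldl (fun ors p => p.2.items.foldl (pvStepB ed p.1) ors) ors).map
          (fun rs => pvP (pvGdict rs)) := by
  induction ps generalizing ors with
  | nil => rfl
  | cons p t ih => rw [List.foldl_cons, List.foldl_cons, pvFoldInner_eq]; exact ih _

-- the grouped dict's items ARE B's gather-by-filter table
theorem pvGdict_items (rows : List (String × Bool × Int × Int × Int)) :
    (pvGdict rows).items
      = (rows.foldl (fun acc r => PySem.Set.add acc r.1) []).map
          (fun g => (g, (rows.filter (fun r => r.1 == g)).map (·.2))) := by
  have hnd : (pvGdict rows).keys.Nodup := by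
    unfold pvGdict
    exact PySem.Dict.nodup_keys_foldl_modify_key rows (·.1) []
      (fun _ x => (· ++ [x.2])) PySem.Dict.empty PySem.Dict.nodup_keys_empty
  have hkeys : (pvGdict rows).keys = rows.foldl (fun acc r => PySem.Set.add acc r.1) [] := by
    unfold pvGdict
    rw [PySem.Dict.keys_foldl_modify_key]
    rw [← PySem.Set.update_map_eq_foldl_add]
    rfl
  rw [PySem.Dict.items_eq_map_keys (pvGdict rows) hnd [], hkeys]
  apply List.map_congr_left
  intro g _
  have hg : (pvGdict rows).getD g []
      = (rows.filter (fun r => r.1 == g)).map (·.2) := by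
    unfold pvGdict
    rw [PySem.Dict.getD_foldl_modify_append]
    simp
  rw [hg]

-- ===== VERDICT (by name: the statement is the Claim_ definition above) =====
theorem data_fusion_spec : Claim_equal_data_fusion := by
  intro event_dict group_id_dict _ _
  unfold Spec_data_fusion data_fusion data_fusion_alt
  have h : (pvGroups group_id_dict).items.foldl
      (fun st p => p.2.items.foldl (pvStepA (pvEvents event_dict) p.1) st)
      (some (PySem.Dict.empty, PySem.Dict.empty, PySem.Dict.empty, PySem.Dict.empty))
    = ((pvGroups group_id_dict).items.foldl
      (fun ors p => p.2.items.foldl (pvStepB (pvEvents event_dict) p.1) ors)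
      (some [])).map (fun rs => pvP (pvGdict rs)) :=
    pvFoldOuter_eq (pvEvents event_dict) (pvGroups group_id_dict).items (some [])
  rw [h]
  cases (pvGroups group_id_dict).items.foldl
      (fun ors p => p.2.items.foldl (pvStepB (pvEvents event_dict) p.1) ors)
      (some []) with
  | none => rfl
  | some rows =>
    show ((pvP (pvGdict rows)).1.items, (pvP (pvGdict rows)).2.1.items,
          (pvP (pvGdict rows)).2.2.1.items, (pvP (pvGdict rows)).2.2.2.items) = _
    have hitems := pvGdict_items rows
    refine Prod.ext ?_ (Prod.ext ?_ (Prod.ext ?_ ?_)) <;>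
    · show ((pvGdict rows).items.map _) = _
      rw [hitems, List.map_map]
      apply List.map_congr_left
      intro g _
      simp [Function.comp, List.map_map]
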